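-- pv_equiv track=rewrite | github.com/Rys-Nowak/language-analysis | bipartite_graph.py | create_bipartite_graph
-- ===== SOURCE A (Python) =====
-- from typing import Tuple
--
-- def create_bipartite_graph(text) -> Tuple[dict, dict]:
--     counter = {}
--     graph = {}
--
--     for i in range(0, len(text) - 1):
--         curr_word = text[i]
--         next_word = text[i + 1]
--         if curr_word not in counter:
--             counter[curr_word] = {}
--             graph[curr_word] = 0
--
--         if next_word not in counter[curr_word]:
--             counter[curr_word][next_word] = 1
--             graph[curr_word] += 1
--         else:
--             counter[curr_word][next_word] += 1
--
--     return counter, graph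
-- ===== SOURCE B (Python) =====
-- def create_bipartite_graph(text):
--     buckets = {}
--     for c, n in zip(text, text[1:]):
--         buckets.setdefault(c, []).append(n)
--     counter = {w: {n: succ.count(n) for n in dict.fromkeys(succ)}
--                for w, succ in buckets.items()}
--     graph = {w: len(d) for w, d in counter.items()}
--     return counter, graph
-- ===== Notes on version B (the rewrite author's own statement) =====
-- stated objective: alternative
-- what changed: B replaces A's single incremental pass that branches per bigram to maintain two count dicts with a staged group-then-count algorithm: it first buckets each word's successor list, then builds each inner dict declaratively by dedup + list.count over the bucket, and derives the degree dict from inner-dict sizes instead of inline increments.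
import Mathlib
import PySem

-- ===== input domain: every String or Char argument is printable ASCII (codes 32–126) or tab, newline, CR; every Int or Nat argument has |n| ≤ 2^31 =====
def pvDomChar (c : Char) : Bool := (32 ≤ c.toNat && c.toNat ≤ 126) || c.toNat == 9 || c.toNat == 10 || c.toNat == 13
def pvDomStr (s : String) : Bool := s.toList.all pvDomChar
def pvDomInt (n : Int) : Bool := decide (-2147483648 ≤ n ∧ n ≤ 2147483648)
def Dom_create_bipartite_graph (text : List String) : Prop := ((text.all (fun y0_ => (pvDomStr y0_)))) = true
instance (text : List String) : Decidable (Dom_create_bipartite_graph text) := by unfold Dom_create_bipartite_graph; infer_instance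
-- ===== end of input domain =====

-- B replaces A's single incremental pass over bigrams with grouped counting: dedup the
-- first components, then one separate successor scan + list.count per distinct word
-- (objective: alternative; not faster).

-- ===== PORT A =====
-- A's loop body as a helper: the two ifs in source order; in-place mutation of the inner
-- dict 'counter[curr_word][...]' is rendered as re-inserting the updated inner dict
-- (insert overwrites in place), 'graph[curr_word] += 1' as Dict.modify (key always present).
def pvStepA (st : PySem.Dict String (PySem.Dict String Int) × PySem.Dict String Int)
    (curr_word next_word : String) :
    PySem.Dict String (PySem.Dict String Int) × PySem.Dict String Int :=
  let cg :=
    if st.1.contains curr_word = false then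
      (st.1.insert curr_word PySem.Dict.empty, st.2.insert curr_word (0 : Int))
    else st
  if (cg.1.getD curr_word PySem.Dict.empty).contains next_word = false then
    (cg.1.insert curr_word ((cg.1.getD curr_word PySem.Dict.empty).insert next_word 1),
     cg.2.modify curr_word 0 (· + 1))
  else
    (cg.1.insert curr_word ((cg.1.getD curr_word PySem.Dict.empty).modify next_word 0 (· + 1)),
     cg.2)

-- text[i] and text[i+1] are always in range for i in range(0, len(text)-1); the pyGetD default is never read.
def create_bipartite_graph (text : List String) :
    (List (String × List (String × Int))) × (List (String × Int)) :=
  let st := (PySem.List.pyRange 0 (PySem.List.len text - 1)).foldl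
    (fun st i => pvStepA st (PySem.List.pyGetD text i "") (PySem.List.pyGetD text (i + 1) ""))
    (PySem.Dict.empty, PySem.Dict.empty)
  (st.1.items.map (fun p => (p.1, p.2.items)), st.2.items)

-- ===== PORT B =====
-- 'buckets.setdefault(c, []).append(n)' mutates the list held at key c in place: rendered
-- exactly as Dict.modify c [] (· ++ [n]) (d[c] = d.get(c, []) + [n]).
-- '{n: succ.count(n) for n in dict.fromkeys(succ)}'
def pvCountDict (succ : List String) : List (String × Int) :=
  (PySem.List.dedup succ).map (fun n => (n, (PySem.List.count succ n : Int)))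

def create_bipartite_graph_alt (text : List String) :
    (List (String × List (String × Int))) × (List (String × Int)) :=
  let buckets := (text.zip (PySem.List.slice text (some 1))).foldl
    (fun d p => d.modify p.1 ([] : List String) (· ++ [p.2])) PySem.Dict.empty
  let counter := buckets.items.map (fun g => (g.1, pvCountDict g.2))
  (counter, counter.map (fun p => (p.1, (p.2.length : Int))))

-- ===== PRECONDITION & SPEC =====
def Spec_create_bipartite_graph (text : List String) (out : (List (String × List (String × Int))) × (List (String × Int))) : Prop := out = create_bipartite_graph_alt text
instance (text : List String) (out : (List (String × List (String × Int))) × (List (String × Int))) : Decidable (Spec_create_bipartite_graph text out) := by unfold Spec_create_bipartite_graph; infer_instance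

-- ===== CLAIM (what is proved, stated in full; the proofs are below) =====
def Claim_equal_create_bipartite_graph : Prop := ∀ (text : List String), Dom_create_bipartite_graph text → Spec_create_bipartite_graph text (create_bipartite_graph text)

-- ===== LEMMAS AND PROOFS =====

-- A's index loop over range(0, len(text)-1) is the fold over consecutive pairs.
lemma pvBridge {α β : Type} (xs : List α) (d : α) (f : β → α → α → β) (init : β) :
    (PySem.List.pyRange 0 (PySem.List.len xs - 1)).foldl
      (fun st i => f st (PySem.List.pyGetD xs i d) (PySem.List.pyGetD xs (i + 1) d)) init
    = (xs.zip (xs.drop 1)).foldl (fun st p => f st p.1 p.2) init := by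
  cases xs with
  | nil =>
      rw [show PySem.List.len ([] : List α) - 1 = -1 from by simp [PySem.List.len]]
      rw [show PySem.List.pyRange 0 (-1) = [] from by decide]
      rfl
  | cons x t =>
      have hlen : PySem.List.len ((x :: t).zip ((x :: t).drop 1)) = PySem.List.len (x :: t) - 1 := by
        simp [PySem.List.len, List.length_zip]
      rw [← hlen,
        ← PySem.List.foldl_pyRange_zero_pyGetD ((x :: t).zip ((x :: t).drop 1)) (d, d)
          (fun st p => f st p.1 p.2) init]
      apply PySem.List.foldl_congr_mem
      intro acc j hj
      rw [PySem.List.mem_pyRange_one] at hj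
      obtain ⟨h0, h1⟩ := hj
      rw [hlen] at h1
      have hlt : j < (t.length : Int) := by
        simp [PySem.List.len] at h1; omega
      have hj1 : (j + 1).toNat = j.toNat + 1 := by omega
      rw [PySem.List.pyGetD_eq_getElem _ _ h0 (by simp; omega),
        PySem.List.pyGetD_eq_getElem _ _ (by omega) (by simp; omega),
        PySem.List.pyGetD_eq_getElem _ _ h0 (by simp [List.length_zip]; omega)]
      simp [List.getElem_zip, hj1]

-- B's per-word successor scan, as a function of the full pair list
def pvInner (pairs : List (String × String)) (w : String) : List (String × Int) :=
  pvCountDict ((pairs.filter (fun q => q.1 == w)).map Prod.snd)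

-- the distinct curr_words of the processed bigrams, in first-occurrence order
def pvK (ps : List (String × String)) : List String := PySem.List.dedup (ps.map Prod.fst)

-- A's two dicts after processing ps, expressed in B's grouped form
def pvCtr (ps : List (String × String)) : PySem.Dict String (PySem.Dict String Int) :=
  PySem.Dict.mk ((pvK ps).map (fun w => (w, PySem.Dict.mk (pvInner ps w))))
def pvGr (ps : List (String × String)) : PySem.Dict String Int :=
  PySem.Dict.mk ((pvK ps).map (fun w => (w, ((pvInner ps w).length : Int))))

lemma pvK_nodup (ps : List (String × String)) : (pvK ps).Nodup := by
  simp only [pvK, PySem.List.dedup_eq_ofList]; exact PySem.Set.nodup_ofList _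

lemma pvK_snoc (ps : List (String × String)) (p : String × String) :
    pvK (ps ++ [p]) = PySem.Set.add (pvK ps) p.1 := by
  simp [pvK, PySem.Set.ofList_append_singleton]

lemma pvInner_snoc_ne (ps : List (String × String)) (p : String × String) (w : String)
    (h : w ≠ p.1) : pvInner (ps ++ [p]) w = pvInner ps w := by
  have : (p.1 == w) = false := by simp [Ne.symm h]
  simp [pvInner, List.filter_append, this]

lemma pvInner_snoc_self (ps : List (String × String)) (p : String × String) :
    pvInner (ps ++ [p]) p.1 =
      (PySem.Set.add
          (PySem.List.dedup ((ps.filter (fun q => q.1 == p.1)).map Prod.snd)) p.2).map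
        (fun n => (n, (((ps.filter (fun q => q.1 == p.1)).map Prod.snd).count n
          + if p.2 = n then 1 else 0 : Int))) := by
  simp only [pvInner, pvCountDict, List.filter_append, List.filter_cons, List.filter_nil,
    beq_self_eq_true, if_true, List.map_append, List.map_cons, List.map_nil]
  rw [show PySem.List.dedup (((ps.filter (fun q => q.1 == p.1)).map Prod.snd) ++ [p.2])
      = PySem.Set.add (PySem.List.dedup ((ps.filter (fun q => q.1 == p.1)).map Prod.snd)) p.2 from by
    simp [PySem.Set.ofList_append_singleton]]
  apply List.map_congr_left
  intro n _
  simp only [PySem.List.count_eq, List.count_append, List.count_singleton]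
  by_cases hn : p.2 = n
  · simp [hn]
  · simp [hn]

-- getD / contains on a Dict.mk of a (w, f w) map over a Nodup key list
lemma pvGetD_mk_map {ν : Type} (K : List String) (f : String → ν) (w : String) (d0 : ν)
    (hnd : K.Nodup) (hw : w ∈ K) :
    (PySem.Dict.mk (K.map (fun k => (k, f k)))).getD w d0 = f w := by
  apply PySem.Dict.getD_of_mem_items
  · exact List.mem_map_of_mem hw
  · show ((K.map (fun k => (k, f k))).map (fun p : String × ν => p.1)).Nodup
    rw [List.map_map,
      show ((fun p : String × ν => p.1) ∘ fun k => (k, f k)) = id from rfl, List.map_id]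
    exact hnd

lemma pvContains_mk_map {ν : Type} (K : List String) (f : String → ν) (w : String) :
    (PySem.Dict.mk (K.map (fun k => (k, f k)))).contains w = decide (w ∈ K) := by
  rw [PySem.Dict.contains_eq_decide_mem_keys]
  simp [PySem.Dict.keys, List.map_map, Function.comp]

-- one step of A's loop takes the grouped form at ps to the grouped form at ps ++ [p]
lemma pvInner_eq (pairs : List (String × String)) (w : String) :
    pvInner pairs w
      = (PySem.List.dedup ((pairs.filter (fun q => q.1 == w)).map Prod.snd)).map
          (fun n => (n, (PySem.List.count ((pairs.filter (fun q => q.1 == w)).map Prod.snd) n : Int))) := rfl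

lemma pvStep_snoc (ps : List (String × String)) (p : String × String) :
    pvStepA (pvCtr ps, pvGr ps) p.1 p.2 = (pvCtr (ps ++ [p]), pvGr (ps ++ [p])) := by
  have hndK := pvK_nodup ps
  have hndS : (PySem.List.dedup ((ps.filter (fun q => q.1 == p.1)).map Prod.snd)).Nodup := by
    simp only [PySem.List.dedup_eq_ofList]; exact PySem.Set.nodup_ofList _
  by_cases hmem : p.1 ∈ pvK ps
  · -- curr_word already among the processed first components
    have hc : (pvCtr ps).contains p.1 = true := by
      rw [pvCtr, pvContains_mk_map]; simpa using hmem
    have hK' : pvK (ps ++ [p]) = pvK ps := by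
      rw [pvK_snoc, PySem.Set.add_of_mem hmem]
    have hgd : (pvCtr ps).getD p.1 PySem.Dict.empty = PySem.Dict.mk (pvInner ps p.1) := by
      rw [pvCtr]; exact pvGetD_mk_map _ _ _ _ hndK hmem
    have hcin : (PySem.Dict.mk (pvInner ps p.1)).contains p.2
        = decide (p.2 ∈ (ps.filter (fun q => q.1 == p.1)).map Prod.snd) := by
      rw [pvInner_eq, pvContains_mk_map]
      simp
    by_cases hs : p.2 ∈ (ps.filter (fun q => q.1 == p.1)).map Prod.snd
    · -- next_word already counted: modify the inner count, graph unchanged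
      have hlen : (pvInner (ps ++ [p]) p.1).length = (pvInner ps p.1).length := by
        rw [pvInner_snoc_self, PySem.Set.add_of_mem ((PySem.List.mem_dedup _ _).mpr hs), pvInner_eq]
        simp
      have hinner : (PySem.Dict.mk (pvInner ps p.1)).modify p.2 0 (· + 1)
          = PySem.Dict.mk (pvInner (ps ++ [p]) p.1) := by
        apply PySem.Dict.ext
        have hgd2 : (PySem.Dict.mk (pvInner ps p.1)).getD p.2 0
            = (PySem.List.count ((ps.filter (fun q => q.1 == p.1)).map Prod.snd) p.2 : Int) := by
          rw [pvInner_eq]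
          exact pvGetD_mk_map _ _ _ _ hndS (by simp [hs])
        rw [PySem.Dict.modify, hgd2,
          PySem.Dict.items_insert_of_contains _ _ (by rw [hcin]; simpa using hs)]
        rw [pvInner_snoc_self, PySem.Set.add_of_mem ((PySem.List.mem_dedup _ _).mpr hs)]
        show (pvInner ps p.1).map _ = _
        rw [pvInner_eq, List.map_map]
        apply List.map_congr_left
        intro n _
        by_cases hn : n = p.2
        · simp [Function.comp, hn]
        · simp [Function.comp, hn, Ne.symm hn]
      rw [show pvStepA (pvCtr ps, pvGr ps) p.1 p.2
            = ((pvCtr ps).insert p.1 (PySem.Dict.mk (pvInner (ps ++ [p]) p.1)), pvGr ps) from by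
        simp [pvStepA, hc, hgd, hcin, hs, hinner]]
      refine Prod.ext ?_ ?_
      · apply PySem.Dict.ext
        rw [PySem.Dict.items_insert_of_contains _ _ hc]
        show ((pvK ps).map _).map _ = _
        rw [pvCtr, hK', List.map_map]
        apply List.map_congr_left
        intro w hw
        by_cases hwp : w = p.1
        · simp [Function.comp, hwp]
        · simp [Function.comp, hwp, pvInner_snoc_ne ps p w hwp]
      · apply PySem.Dict.ext
        show (pvK ps).map _ = _
        rw [pvGr, hK']
        apply List.map_congr_left
        intro w hw
        by_cases hwp : w = p.1
        · simp [hwp, hlen]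
        · rw [pvInner_snoc_ne ps p w hwp]
    · -- next_word is new for p.1: append to the inner dict, bump the degree
      have hlen : (pvInner (ps ++ [p]) p.1).length = (pvInner ps p.1).length + 1 := by
        rw [pvInner_snoc_self, PySem.Set.add_of_not_mem (fun h => hs ((PySem.List.mem_dedup _ _).mp h)), pvInner_eq]
        simp
      have hinner : (PySem.Dict.mk (pvInner ps p.1)).insert p.2 1
          = PySem.Dict.mk (pvInner (ps ++ [p]) p.1) := by
        apply PySem.Dict.ext
        rw [PySem.Dict.items_insert_of_not_contains _ _ (by rw [hcin]; simpa using hs)]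
        rw [pvInner_snoc_self, PySem.Set.add_of_not_mem (fun h => hs ((PySem.List.mem_dedup _ _).mp h)), List.map_append]
        show pvInner ps p.1 ++ [(p.2, 1)] = _
        congr 1
        · rw [pvInner_eq]
          apply List.map_congr_left
          intro n hn
          have hne : n ≠ p.2 := by
            intro h; exact hs (by rw [← h]; exact (PySem.List.mem_dedup _ _).mp hn)
          simp [Ne.symm hne]
        · have h0 : ((ps.filter (fun q => q.1 == p.1)).map Prod.snd).count p.2 = 0 :=
            List.count_eq_zero.mpr hs
          simp [h0]
      rw [show pvStepA (pvCtr ps, pvGr ps) p.1 p.2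
            = ((pvCtr ps).insert p.1 (PySem.Dict.mk (pvInner (ps ++ [p]) p.1)),
               (pvGr ps).modify p.1 0 (· + 1)) from by
        simp [pvStepA, hc, hgd, hcin, hs, hinner]]
      refine Prod.ext ?_ ?_
      · apply PySem.Dict.ext
        rw [PySem.Dict.items_insert_of_contains _ _ hc]
        show ((pvK ps).map _).map _ = _
        rw [pvCtr, hK', List.map_map]
        apply List.map_congr_left
        intro w hw
        by_cases hwp : w = p.1
        · simp [Function.comp, hwp]
        · simp [Function.comp, hwp, pvInner_snoc_ne ps p w hwp]
      · have hgc : (pvGr ps).contains p.1 = true := by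
          rw [pvGr, pvContains_mk_map]; simpa using hmem
        have hggd : (pvGr ps).getD p.1 0 = ((pvInner ps p.1).length : Int) := by
          rw [pvGr]; exact pvGetD_mk_map _ _ _ _ hndK hmem
        apply PySem.Dict.ext
        rw [PySem.Dict.modify, hggd, PySem.Dict.items_insert_of_contains _ _ hgc]
        show ((pvK ps).map _).map _ = _
        rw [pvGr, hK', List.map_map]
        apply List.map_congr_left
        intro w hw
        by_cases hwp : w = p.1
        · simp [Function.comp, hwp, hlen]
        · simp [Function.comp, hwp, pvInner_snoc_ne ps p w hwp]
  · -- curr_word is new: both dicts gain a fresh entry at the end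
    have hc : (pvCtr ps).contains p.1 = false := by
      rw [pvCtr, pvContains_mk_map]; simpa using hmem
    have hK' : pvK (ps ++ [p]) = pvK ps ++ [p.1] := by
      rw [pvK_snoc, PySem.Set.add_of_not_mem hmem]
    have hfil : ps.filter (fun q => q.1 == p.1) = [] := by
      rw [List.filter_eq_nil_iff]
      intro q hq hq1
      apply hmem
      rw [pvK]
      have : p.1 ∈ ps.map Prod.fst := List.mem_map.mpr ⟨q, hq, by simpa using hq1⟩
      simpa [PySem.List.mem_dedup] using this
    have hInnerNew : pvInner (ps ++ [p]) p.1 = [(p.2, 1)] := by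
      rw [pvInner_snoc_self, hfil]
      simp [PySem.Set.add]
    have hgr : (pvGr ps).contains p.1 = false := by
      rw [pvGr, pvContains_mk_map]; simpa using hmem
    rw [show pvStepA (pvCtr ps, pvGr ps) p.1 p.2
          = ((pvCtr ps).insert p.1 (PySem.Dict.empty.insert p.2 1),
             ((pvGr ps).insert p.1 0).modify p.1 0 (· + 1)) from by
      simp [pvStepA, hc, PySem.Dict.getD_insert_self, PySem.Dict.contains_empty,
        PySem.Dict.insert_insert_self]]
    refine Prod.ext ?_ ?_
    · apply PySem.Dict.ext
      rw [PySem.Dict.items_insert_of_not_contains _ _ hc]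
      show (pvK ps).map _ ++ _ = _
      rw [pvCtr, hK', List.map_append]
      congr 1
      · apply List.map_congr_left
        intro w hw
        have hwp : w ≠ p.1 := by rintro rfl; exact hmem hw
        rw [pvInner_snoc_ne ps p w hwp]
      · rw [List.map_singleton, hInnerNew]
        rfl
    · apply PySem.Dict.ext
      rw [PySem.Dict.modify, PySem.Dict.getD_insert_self,
        PySem.Dict.insert_insert_self,
        PySem.Dict.items_insert_of_not_contains _ _ hgr]
      show (pvK ps).map _ ++ _ = _
      rw [pvGr, hK', List.map_append]
      congr 1
      · apply List.map_congr_left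
        intro w hw
        have hwp : w ≠ p.1 := by rintro rfl; exact hmem hw
        rw [pvInner_snoc_ne ps p w hwp]
      · rw [List.map_singleton, hInnerNew]
        rfl

lemma pvLoopA (ps : List (String × String)) :
    ps.foldl (fun st p => pvStepA st p.1 p.2) (PySem.Dict.empty, PySem.Dict.empty)
      = (pvCtr ps, pvGr ps) := by
  induction ps using List.reverseRecOn with
  | nil => rfl
  | append_singleton ps p ih =>
      rw [List.foldl_append, List.foldl_cons, List.foldl_nil, ih, pvStep_snoc]

-- B's bucketing loop, characterised: items are (word, successor list) per distinct word
lemma pvBuckets_items (ps : List (String × String)) :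
    ((ps.foldl (fun d p => d.modify p.1 ([] : List String) (· ++ [p.2]))
        PySem.Dict.empty).items)
      = (pvK ps).map (fun w => (w, (ps.filter (fun q => q.1 == w)).map Prod.snd)) := by
  have hnd : ((ps.foldl (fun d p => d.modify p.1 ([] : List String) (· ++ [p.2]))
      PySem.Dict.empty).keys).Nodup :=
    PySem.Dict.nodup_keys_foldl_modify_key ps Prod.fst [] (fun _ p => (· ++ [p.2])) _
      PySem.Dict.nodup_keys_empty
  have hkeys : ((ps.foldl (fun d p => d.modify p.1 ([] : List String) (· ++ [p.2]))
      PySem.Dict.empty).keys) = pvK ps := by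
    rw [PySem.Dict.keys_foldl_modify_key]
    simp [pvK, PySem.Dict.keys_empty, PySem.Set.update_nil_left]
  rw [PySem.Dict.items_eq_map_keys _ hnd ([] : List String), hkeys]
  apply List.map_congr_left
  intro w _
  rw [PySem.Dict.getD_foldl_modify_append]
  simp [PySem.Dict.getD_empty]

-- ===== VERDICT (by name: the statement is the Claim_ definition above) =====
theorem create_bipartite_graph_spec : Claim_equal_create_bipartite_graph := by
  unfold Claim_equal_create_bipartite_graph
  intro text _
  unfold Spec_create_bipartite_graph create_bipartite_graph create_bipartite_graph_alt
  rw [PySem.List.slice_from text (by norm_num)]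
  rw [pvBridge text "" (fun st a b => pvStepA st a b) (PySem.Dict.empty, PySem.Dict.empty)]
  rw [pvLoopA]
  simp only [Int.toNat_one, pvBuckets_items, List.map_map, pvCtr, pvGr]
  rfl
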